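-- pv_equiv track=rewrite | github.com/mjpost/sockeye-scripts | source_factors/broadcast.py | compute_bpe
-- ===== SOURCE A (Python) =====
-- BPE_SUFFIX = '@@'
--
-- def compute_bpe(bpe_str: str) -> str:
--     """
--     Computes NER-style features for a BPE stream. e.g.,
--
--     The boy ate the waff@@ le .
--       O   O   O   O      B  E O
--
--     The options are:
--     O: a complete word
--     B: beginning of a multi-token word
--     I: interior of a multi-token word
--     E: end of a multi-token word
--
--     :param bpe_str: The BPE string.
--     :return: A string of BPE factors.
--     """
--     factors = []
--     was_in_bpe = False
--     for i, token in enumerate(bpe_str.split()):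
--         now_in_bpe = token.endswith(BPE_SUFFIX)
--         if was_in_bpe:
--             if now_in_bpe:
--                 factor = 'I'
--             else:
--                 factor = 'E'
--         else:
--             if now_in_bpe:
--                 factor = 'B'
--             else:
--                 factor = 'O'
--
--         was_in_bpe = now_in_bpe
--         factors.append(factor)
--
--     return ' '.join(factors)
-- ===== SOURCE B (Python) =====
-- BPE_SUFFIX = '@@'
--
-- def compute_bpe(bpe_str: str) -> str:
--     # Run-length / word-chunking formulation: scan for each maximal run of
--     # '@@'-suffixed tokens (plus its closing plain token, if any) and emit the
--     # whole word's label block at once: 'O' for a lone plain token,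
--     # 'B' + 'I'*(run-1) + optional 'E' for a multi-piece word.
--     tokens = bpe_str.split()
--     n = len(tokens)
--     labels = []
--     i = 0
--     while i < n:
--         j = i
--         while j < n and tokens[j].endswith(BPE_SUFFIX):
--             j += 1
--         if j == i:
--             labels.append('O')
--             i += 1
--         else:
--             closed = j < n
--             labels.extend(['B'] + ['I'] * (j - i - 1) + (['E'] if closed else []))
--             i = j + 1 if closed else j
--     return ' '.join(labels)
-- ===== Notes on version B (the rewrite author's own statement) =====
-- stated objective: alternative
-- what changed: Replaces A's token-by-token streaming pass with a carried boolean state by a word-chunking scan: it finds each maximal run of '@@'-suffixed tokens and emits the whole word's label block ('O', or 'B'+'I'*(run-1)+optional 'E') at once by run length.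
import Mathlib
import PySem

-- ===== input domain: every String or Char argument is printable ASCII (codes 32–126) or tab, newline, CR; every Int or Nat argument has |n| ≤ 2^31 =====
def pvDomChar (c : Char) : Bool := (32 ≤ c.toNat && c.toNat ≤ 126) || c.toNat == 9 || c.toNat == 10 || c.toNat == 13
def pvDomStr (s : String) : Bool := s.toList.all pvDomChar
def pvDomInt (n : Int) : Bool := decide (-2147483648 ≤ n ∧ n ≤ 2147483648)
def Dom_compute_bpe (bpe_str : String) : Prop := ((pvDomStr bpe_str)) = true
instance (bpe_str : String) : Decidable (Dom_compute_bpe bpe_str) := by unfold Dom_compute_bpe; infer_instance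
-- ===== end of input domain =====

-- B replaces A's streaming pass with a carried boolean by a word-chunking scan
-- that emits each word's whole label block by run length (alternative, same cost).

-- ===== PORT A =====
-- one loop step: state = (factors so far, was_in_bpe)
def computeBpeStep (st : List String × Bool) (token : String) : List String × Bool :=
  let now_in_bpe := PySem.Str.endswith token "@@"
  let factor :=
    if st.2 then (if now_in_bpe then "I" else "E")
    else (if now_in_bpe then "B" else "O")
  (st.1 ++ [factor], now_in_bpe)

def compute_bpe (bpe_str : String) : String :=
  PySem.Str.join " " ((PySem.Str.split₀ bpe_str).foldl computeBpeStep ([], false)).1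

-- ===== PORT B =====
def bpeFlag (t : String) : Bool := PySem.Str.endswith t "@@"

-- Source B's outer while loop over the token index, as recursion on the remaining
-- suffix of tokens; the inner while loop advancing j is the takeWhile count.
def labelWords (tokens : List String) : List String :=
  match tokens with
  | [] => []
  | t :: rest =>
    let m := ((t :: rest).takeWhile bpeFlag).length
    if hm : m = 0 then "O" :: labelWords rest
    else
      let closed := decide (m < (t :: rest).length)
      ("B" :: List.replicate (m - 1) "I" ++ (if closed then ["E"] else [])) ++
        labelWords ((t :: rest).drop (if closed then m + 1 else m))
termination_by tokens.length
decreasing_by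
  · simp
  · simp only [List.length_drop]
    have : 1 ≤ m := Nat.one_le_iff_ne_zero.mpr hm
    split <;> simp <;> omega

def compute_bpe_alt (bpe_str : String) : String :=
  PySem.Str.join " " (labelWords (PySem.Str.split₀ bpe_str))

-- ===== PRECONDITION & SPEC =====
def Spec_compute_bpe (bpe_str : String) (out : String) : Prop := out = compute_bpe_alt bpe_str
instance (bpe_str : String) (out : String) : Decidable (Spec_compute_bpe bpe_str out) := by unfold Spec_compute_bpe; infer_instance

-- ===== CLAIM (what is proved, stated in full; the proofs are below) =====
def Claim_equal_compute_bpe : Prop := ∀ (bpe_str : String), Dom_compute_bpe bpe_str → Spec_compute_bpe bpe_str (compute_bpe bpe_str)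

-- ===== LEMMAS AND PROOFS =====
-- A's stream, as a recursive characterisation carrying was_in_bpe
def aLab (w : Bool) : List String → List String
  | [] => []
  | t :: rest =>
    (if w then (if bpeFlag t then "I" else "E") else (if bpeFlag t then "B" else "O"))
      :: aLab (bpeFlag t) rest

theorem computeBpe_fold_eq (ts : List String) (fs : List String) (w : Bool) :
    (ts.foldl computeBpeStep (fs, w)).1 = fs ++ aLab w ts := by
  induction ts generalizing fs w with
  | nil => simp [aLab]
  | cons t rest ih =>
    simp only [List.foldl_cons, aLab]
    rw [computeBpeStep, ih]
    cases w <;> cases h : bpeFlag t <;> simp_all [bpeFlag]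

-- in the was_in_bpe state, A emits one 'I' per remaining leading '@@' token,
-- then 'E' and a fresh restart if a plain token closes the word
theorem aLab_true (ts : List String) :
    aLab true ts =
      List.replicate (ts.takeWhile bpeFlag).length "I" ++
        (if (ts.takeWhile bpeFlag).length < ts.length then
          "E" :: aLab false (ts.drop ((ts.takeWhile bpeFlag).length + 1))
        else []) := by
  induction ts with
  | nil => simp [aLab]
  | cons t rest ih =>
    by_cases h : bpeFlag t = true
    · simp only [aLab, h, List.takeWhile_cons, if_true]
      rw [ih]
      simp [List.replicate_succ]
    · simp [aLab, h, List.takeWhile_cons]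

theorem aLab_false_eq_labelWords (ts : List String) : aLab false ts = labelWords ts := by
  induction hn : ts.length using Nat.strong_induction_on generalizing ts with
  | _ n ih =>
    match ts, hn with
    | [], _ => simp [aLab, labelWords]
    | t :: rest, hn =>
      rw [labelWords]
      by_cases h : bpeFlag t = true
      · have hm : ((t :: rest).takeWhile bpeFlag).length =
            (rest.takeWhile bpeFlag).length + 1 := by
          simp [List.takeWhile_cons, h]
        rw [hm, dif_neg (Nat.succ_ne_zero _)]
        simp only [aLab, h, if_true]
        rw [aLab_true]
        set k := (rest.takeWhile bpeFlag).length with hk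
        have hkle : k ≤ rest.length := (List.takeWhile_sublist bpeFlag).length_le
        by_cases hc : k < rest.length
        · have hc' : k + 1 < (t :: rest).length := by simp; omega
          have hlen : rest.length + 1 = n := by simpa using hn
          have ihd := ih (rest.drop (k + 1)).length (by simp; omega) (rest.drop (k + 1)) rfl
          simp [hc, hc', ihd, List.replicate_succ]
        · have hke : k = rest.length := by omega
          have hc' : ¬ (k + 1 < (t :: rest).length) := by simp; omega
          have hdrop : rest.drop k = ([] : List String) :=
            List.drop_eq_nil_of_le (by omega)
          rw [if_neg hc, decide_eq_false hc']
          simp only [Bool.false_eq_true, if_false, List.drop_succ_cons, hdrop]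
          rw [labelWords]
          simp
      · have hm : ((t :: rest).takeWhile bpeFlag).length = 0 := by
          simp [List.takeWhile_cons, h]
        rw [hm, dif_pos rfl]
        have := ih rest.length (by rw [← hn]; simp) rest rfl
        simp [aLab, this, h]

-- ===== VERDICT (by name: the statement is the Claim_ definition above) =====
theorem compute_bpe_spec : Claim_equal_compute_bpe := by
  intro s _
  show _ = _
  rw [compute_bpe, compute_bpe_alt, computeBpe_fold_eq, aLab_false_eq_labelWords]
  simp
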